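-- pv_equiv track=rewrite | github.com/alardill/CharCut | charcut.py | residual_diff
-- ===== SOURCE A (Python) =====
-- def residual_diff(mask):
--     """
--     Factor successive 0's from a mask.
--
--     Returns list of pairs: (start position, length)
--     """
--     buf = []
--     for i, elt in enumerate(mask):
--         if elt:
--             buf.append(i)
--         elif buf:
--             yield buf[0], len(buf)
--             buf = []
--     if buf:
--         yield buf[0], len(buf)
-- ===== SOURCE B (Python) =====
-- def residual_diff(mask):
--     """
--     Factor successive 0's from a mask.
--
--     Returns list of pairs: (start position, length)
--     """
--     n = len(mask)
--     i = 0
--     while i < n: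
--         if mask[i]:
--             j = i + 1
--             while j < n and mask[j]:
--                 j += 1
--             yield i, j - i
--             i = j
--         else:
--             i += 1
-- ===== Notes on version B (the rewrite author's own statement) =====
-- stated objective: alternative
-- what changed: Replaced the element-wise pass that accumulates indices in a buffer list with a two-pointer scan: on hitting a truthy element an inner loop advances to the end of the run and yields (start, run length) directly, with no index buffer at all.
import Mathlib
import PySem

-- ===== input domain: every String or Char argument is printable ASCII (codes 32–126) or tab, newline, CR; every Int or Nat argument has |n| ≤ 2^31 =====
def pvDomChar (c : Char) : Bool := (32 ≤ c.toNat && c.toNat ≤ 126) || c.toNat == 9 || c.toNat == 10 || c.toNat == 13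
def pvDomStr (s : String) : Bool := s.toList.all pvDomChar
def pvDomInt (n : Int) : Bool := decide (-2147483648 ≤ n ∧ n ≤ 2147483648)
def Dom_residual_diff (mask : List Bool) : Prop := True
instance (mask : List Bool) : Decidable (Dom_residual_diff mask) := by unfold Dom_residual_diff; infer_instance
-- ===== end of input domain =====

-- B replaces A's element-wise buffer-of-indices pass by a two-pointer run scan (objective: alternative, O(1) extra space).

-- ===== PORT A =====
-- step of A's for-loop: state = (enumerate counter i, buf, emitted output)
def rdStep (st : Int × List Int × List (Int × Int)) (elt : Bool) : Int × List Int × List (Int × Int) :=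
  let (i, buf, out) := st
  if elt then (i + 1, buf ++ [i], out)
  else if buf ≠ [] then (i + 1, [], out ++ [(buf.headI, (buf.length : Int))])
  else (i + 1, buf, out)

def residual_diff (mask : List Bool) : List (Int × Int) :=
  let fin := mask.foldl rdStep (0, [], [])
  if fin.2.1 ≠ [] then fin.2.2 ++ [(fin.2.1.headI, (fin.2.1.length : Int))] else fin.2.2

-- ===== PORT B =====
-- inner while loop: advance j to the end of the truthy run
def rdScan (mask : List Bool) (n j : Nat) : Nat :=
  if j < n ∧ mask.getD j false then rdScan mask n (j + 1) else j
termination_by n - j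

theorem rdScan_ge (mask : List Bool) (n j : Nat) : j ≤ rdScan mask n j := by
  unfold rdScan
  split
  · exact le_trans (Nat.le_succ j) (rdScan_ge mask n (j + 1))
  · exact le_refl j
termination_by n - j
decreasing_by omega

-- outer while loop over i
def rdGo (mask : List Bool) (n i : Nat) : List (Int × Int) :=
  if h : i < n then
    if mask.getD i false then
      let j := rdScan mask n (i + 1)
      ((i : Int), (j : Int) - (i : Int)) :: rdGo mask n j
    else rdGo mask n (i + 1)
  else []
termination_by n - i
decreasing_by
  · have := rdScan_ge mask n (i + 1); omega
  · omega

def residual_diff_alt (mask : List Bool) : List (Int × Int) :=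
  rdGo mask mask.length 0

-- ===== PRECONDITION & SPEC =====
def Spec_residual_diff (mask : List Bool) (out : List (Int × Int)) : Prop := out = residual_diff_alt mask
instance (mask : List Bool) (out : List (Int × Int)) : Decidable (Spec_residual_diff mask out) := by unfold Spec_residual_diff; infer_instance

-- ===== CLAIM (what is proved, stated in full; the proofs are below) =====
def Claim_equal_residual_diff : Prop := ∀ (mask : List Bool), Dom_residual_diff mask → Spec_residual_diff mask (residual_diff mask)

-- ===== LEMMAS AND PROOFS =====

-- common specification: runs of `true`, carrying an optional open run (start, length)
def flushO : Option (Int × Int) → List (Int × Int)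
  | none => []
  | some p => [p]

def Rspec : Option (Int × Int) → Int → List Bool → List (Int × Int)
  | c, _, [] => flushO c
  | c, i, true :: t =>
      Rspec (some (match c with | none => (i, 1) | some (s, m) => (s, m + 1))) (i + 1) t
  | none, i, false :: t => Rspec none (i + 1) t
  | some p, i, false :: t => p :: Rspec none (i + 1) t

def bufOpt (buf : List Int) : Option (Int × Int) :=
  if buf = [] then none else some (buf.headI, (buf.length : Int))

theorem foldl_rdStep_char (t : List Bool) :
    ∀ (i : Int) (buf : List Int) (out : List (Int × Int)),
    (let fin := t.foldl rdStep (i, buf, out)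
     if fin.2.1 ≠ [] then fin.2.2 ++ [(fin.2.1.headI, (fin.2.1.length : Int))] else fin.2.2)
    = out ++ Rspec (bufOpt buf) i t := by
  induction t with
  | nil =>
    intro i buf out
    cases buf <;> simp [bufOpt, flushO, Rspec]
  | cons b t ih =>
    intro i buf out
    cases b with
    | true =>
      have hstep : rdStep (i, buf, out) true = (i + 1, buf ++ [i], out) := by
        simp [rdStep]
      simp only [List.foldl_cons, hstep, ih]
      cases buf <;> simp [bufOpt, Rspec, List.headI]
    | false =>
      cases buf with
      | nil =>
        have hstep : rdStep (i, ([] : List Int), out) false = (i + 1, [], out) := by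
          simp [rdStep]
        simp only [List.foldl_cons, hstep, ih]
        simp [bufOpt, Rspec]
      | cons a l =>
        have hstep : rdStep (i, a :: l, out) false
            = (i + 1, [], out ++ [((a :: l).headI, ((a :: l).length : Int))]) := by
          simp [rdStep]
        simp only [List.foldl_cons, hstep, ih]
        simp [bufOpt, Rspec, List.headI]

-- Rspec with an open run: it closes at the end of the leading true-run
theorem Rspec_some (t : List Bool) :
    ∀ (i s m : Int),
    Rspec (some (s, m)) i t
      = (s, m + ((t.takeWhile id).length : Int)) ::
        Rspec none (i + ((t.takeWhile id).length : Int)) (t.dropWhile id) := by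
  induction t with
  | nil => intro i s m; simp [Rspec, flushO]
  | cons b t ih =>
    intro i s m
    cases b with
    | true =>
      simp only [Rspec, ih, List.takeWhile, List.dropWhile, id]
      have h1 : m + 1 + ((List.takeWhile id t).length : Int)
          = m + (((List.takeWhile id t).length : Int) + 1) := by ring
      have h2 : i + 1 + ((List.takeWhile id t).length : Int)
          = i + (((List.takeWhile id t).length : Int) + 1) := by ring
      rw [List.length_cons]
      push_cast
      rw [h1, h2]
    | false =>
      simp [Rspec, List.takeWhile, List.dropWhile]

theorem dropWhile_eq_drop_tw {α : Type} (p : α → Bool) (l : List α) :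
    l.dropWhile p = l.drop (l.takeWhile p).length := by
  induction l with
  | nil => rfl
  | cons a l ih =>
    by_cases h : p a = true <;> simp [List.dropWhile, List.takeWhile, h, ih]

theorem rdScan_char (mask : List Bool) (j : Nat) :
    rdScan mask mask.length j = j + ((mask.drop j).takeWhile id).length := by
  rw [rdScan]
  split
  · next h =>
    obtain ⟨hj, hm⟩ := h
    rw [rdScan_char mask (j + 1)]
    rw [List.drop_eq_getElem_cons hj]
    rw [List.getD_eq_getElem mask false hj] at hm
    simp only [hm, List.takeWhile, id, List.length_cons]
    omega
  · next h =>
    by_cases hj : j < mask.length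
    · have hm : mask.getD j false = false := by
        by_contra hc
        exact h ⟨hj, by simpa using hc⟩
      rw [List.drop_eq_getElem_cons hj]
      rw [List.getD_eq_getElem mask false hj] at hm
      simp [hm, List.takeWhile]
    · rw [List.drop_eq_nil_of_le (by omega)]
      simp [List.takeWhile]
termination_by mask.length - j
decreasing_by omega

theorem rdGo_char (mask : List Bool) (i : Nat) :
    rdGo mask mask.length i = Rspec none (i : Int) (mask.drop i) := by
  rw [rdGo]
  split
  · next hi =>
    rw [List.drop_eq_getElem_cons hi]
    by_cases hm : mask.getD i false = true
    · have hms := rdScan_ge mask mask.length (i + 1)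
      rw [if_pos hm]
      rw [List.getD_eq_getElem mask false hi] at hm
      rw [hm]
      show ((i : Int), ((rdScan mask mask.length (i + 1) : Nat) : Int) - (i : Int)) ::
          rdGo mask mask.length (rdScan mask mask.length (i + 1))
        = Rspec none (i : Int) (true :: mask.drop (i + 1))
      rw [rdGo_char mask (rdScan mask mask.length (i + 1))]
      have hc := rdScan_char mask (i + 1)
      set c := ((mask.drop (i + 1)).takeWhile id).length with hcdef
      rw [hc]
      have hdw : (mask.drop (i + 1)).dropWhile id = mask.drop (i + 1 + c) := by
        rw [dropWhile_eq_drop_tw, List.drop_drop, ← hcdef]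
      simp only [Rspec]
      rw [Rspec_some, hdw, ← hcdef]
      push_cast
      have h1 : ((i : Int) + 1 + (c : Int)) - (i : Int) = 1 + (c : Int) := by ring
      rw [h1]
    · rw [if_neg hm]
      show rdGo mask mask.length (i + 1) = _
      rw [rdGo_char mask (i + 1)]
      rw [List.getD_eq_getElem mask false hi] at hm
      simp only [Bool.not_eq_true] at hm
      rw [hm]
      simp only [Rspec]
      push_cast
      ring_nf
  · next hi =>
    rw [List.drop_eq_nil_of_le (by omega)]
    simp [Rspec, flushO]
termination_by mask.length - i
decreasing_by
  · have := rdScan_ge mask mask.length (i + 1); omega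
  · omega

-- ===== VERDICT (by name: the statement is the Claim_ definition above) =====
theorem residual_diff_spec : Claim_equal_residual_diff := by
  intro mask _
  unfold Spec_residual_diff residual_diff residual_diff_alt
  have h1 := foldl_rdStep_char mask 0 [] []
  have h2 := rdGo_char mask 0
  simp only [Nat.cast_zero] at h2
  rw [h2, List.drop_zero, h1]
  simp [bufOpt]
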